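-- pv_equiv track=rewrite | github.com/pypi-data/pypi-mirror-182 | packages/extracto/extracto-0.12.tar.gz/extracto-0.12/extracto/bannable_product.py | _bannable_product_5
-- ===== SOURCE A (Python) =====
-- def _bannable_product_5(bans, _0s, _1s, _2s, _3s, _4s): # pragma: no cover
--     ban_0 = bans[0]
--     ban_1 = bans[1]
--     ban_2 = bans[2]
--     ban_3 = bans[3]
--     ban_4 = bans[4]
--
--     for _0 in _0s:
--         if _0 in ban_0:
--             continue
--         for _1 in _1s:
--             if _1 in ban_1:
--                 _1s = [x for x in _1s if not x in ban_1]
--                 continue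
--             if _0 in ban_0:
--                 break
--             for _2 in _2s:
--                 if _2 in ban_2:
--                     _2s = [x for x in _2s if not x in ban_2]
--                     continue
--                 if _0 in ban_0 or _1 in ban_1:
--                     break
--                 for _3 in _3s:
--                     if _3 in ban_3:
--                         _3s = [x for x in _3s if not x in ban_3]
--                         continue
--                     if _0 in ban_0 or _1 in ban_1 or _2 in ban_2:
--                         break
--                     for _4 in _4s:
--                         if _4 in ban_4:
--                             _4s = [x for x in _4s if not x in ban_4]
--                             continue
--                         if _0 in ban_0 or _1 in ban_1 or _2 in ban_2 or _3 in ban_3: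
--                             break
--
--                         yield (_0, _1, _2, _3, _4,)
-- ===== SOURCE B (Python) =====
-- def _bannable_product_5(bans, _0s, _1s, _2s, _3s, _4s):
--     f0 = [x for x in _0s if x not in bans[0]]
--     f1 = [x for x in _1s if x not in bans[1]]
--     f2 = [x for x in _2s if x not in bans[2]]
--     f3 = [x for x in _3s if x not in bans[3]]
--     f4 = [x for x in _4s if x not in bans[4]]
--     for t0 in f0:
--         for t1 in f1:
--             for t2 in f2:
--                 for t3 in f3:
--                     for t4 in f4:
--                         yield (t0, t1, t2, t3, t4)
-- ===== Notes on version B (the rewrite author's own statement) =====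
-- stated objective: simpler
-- what changed: B hoists the banned-element filtering into one pass per list up front and then emits a plain 5-way product, removing A's interleaved per-iteration membership re-checks, dead break conditions and on-the-fly list rebuilds inside the nested loops.
import Mathlib
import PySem

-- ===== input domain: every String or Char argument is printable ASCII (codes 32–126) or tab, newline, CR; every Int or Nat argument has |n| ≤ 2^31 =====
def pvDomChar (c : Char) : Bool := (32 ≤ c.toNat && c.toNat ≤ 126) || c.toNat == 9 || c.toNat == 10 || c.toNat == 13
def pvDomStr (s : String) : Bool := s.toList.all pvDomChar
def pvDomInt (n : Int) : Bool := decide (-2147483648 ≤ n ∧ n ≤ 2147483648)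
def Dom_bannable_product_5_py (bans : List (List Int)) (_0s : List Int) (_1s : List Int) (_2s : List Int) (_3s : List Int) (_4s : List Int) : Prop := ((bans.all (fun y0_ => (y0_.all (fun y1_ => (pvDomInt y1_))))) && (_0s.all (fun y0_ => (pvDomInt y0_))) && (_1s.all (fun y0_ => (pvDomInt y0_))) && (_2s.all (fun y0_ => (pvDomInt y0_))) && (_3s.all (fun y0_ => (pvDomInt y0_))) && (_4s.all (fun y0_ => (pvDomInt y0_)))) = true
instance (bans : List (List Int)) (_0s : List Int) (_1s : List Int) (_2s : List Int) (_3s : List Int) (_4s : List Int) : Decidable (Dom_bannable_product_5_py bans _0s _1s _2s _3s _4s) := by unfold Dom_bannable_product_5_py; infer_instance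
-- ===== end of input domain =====

-- B replaces A's interleaved nested loops with dead break conditions and on-the-fly list
-- rebuilds by one filtering pass per list followed by a plain product traversal (simpler,
-- same return value); both versions are generators, neither mutates its arguments.

-- ===== PORT A =====
-- Python list comprehension `[x for x in s if not x in ban]` (used by both versions)
def pvFilt (ban : List Int) (s : List Int) : List Int := s.filter (fun x => decide (x ∉ ban))

-- innermost loop `for _4 in <snapshot>` with mutable `_4s` threaded through; break returns early
def pvLoop4 (b0 b1 b2 b3 b4 : List Int) (h0 h1 h2 h3 : Int) :
    List Int → List Int → List (Int × Int × Int × Int × Int) × List Int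
  | [], s4 => ([], s4)
  | x :: rest, s4 =>
    if x ∈ b4 then pvLoop4 b0 b1 b2 b3 b4 h0 h1 h2 h3 rest (pvFilt b4 s4)
    else if h0 ∈ b0 ∨ h1 ∈ b1 ∨ h2 ∈ b2 ∨ h3 ∈ b3 then ([], s4)
    else
      let r := pvLoop4 b0 b1 b2 b3 b4 h0 h1 h2 h3 rest s4
      ((h0, h1, h2, h3, x) :: r.1, r.2)

def pvLoop3 (b0 b1 b2 b3 b4 : List Int) (h0 h1 h2 : Int) :
    List Int → List Int → List Int → List (Int × Int × Int × Int × Int) × List Int × List Int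
  | [], s3, s4 => ([], s3, s4)
  | x :: rest, s3, s4 =>
    if x ∈ b3 then pvLoop3 b0 b1 b2 b3 b4 h0 h1 h2 rest (pvFilt b3 s3) s4
    else if h0 ∈ b0 ∨ h1 ∈ b1 ∨ h2 ∈ b2 then ([], s3, s4)
    else
      let r4 := pvLoop4 b0 b1 b2 b3 b4 h0 h1 h2 x s4 s4
      let r := pvLoop3 b0 b1 b2 b3 b4 h0 h1 h2 rest s3 r4.2
      (r4.1 ++ r.1, r.2)

def pvLoop2 (b0 b1 b2 b3 b4 : List Int) (h0 h1 : Int) :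
    List Int → List Int → List Int → List Int →
      List (Int × Int × Int × Int × Int) × List Int × List Int × List Int
  | [], s2, s3, s4 => ([], s2, s3, s4)
  | x :: rest, s2, s3, s4 =>
    if x ∈ b2 then pvLoop2 b0 b1 b2 b3 b4 h0 h1 rest (pvFilt b2 s2) s3 s4
    else if h0 ∈ b0 ∨ h1 ∈ b1 then ([], s2, s3, s4)
    else
      let r3 := pvLoop3 b0 b1 b2 b3 b4 h0 h1 x s3 s3 s4
      let r := pvLoop2 b0 b1 b2 b3 b4 h0 h1 rest s2 r3.2.1 r3.2.2
      (r3.1 ++ r.1, r.2)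

def pvLoop1 (b0 b1 b2 b3 b4 : List Int) (h0 : Int) :
    List Int → List Int → List Int → List Int → List Int →
      List (Int × Int × Int × Int × Int) × List Int × List Int × List Int × List Int
  | [], s1, s2, s3, s4 => ([], s1, s2, s3, s4)
  | x :: rest, s1, s2, s3, s4 =>
    if x ∈ b1 then pvLoop1 b0 b1 b2 b3 b4 h0 rest (pvFilt b1 s1) s2 s3 s4
    else if h0 ∈ b0 then ([], s1, s2, s3, s4)
    else
      let r2 := pvLoop2 b0 b1 b2 b3 b4 h0 x s2 s2 s3 s4
      let r := pvLoop1 b0 b1 b2 b3 b4 h0 rest s1 r2.2.1 r2.2.2.1 r2.2.2.2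
      (r2.1 ++ r.1, r.2)

def pvLoop0 (b0 b1 b2 b3 b4 : List Int) :
    List Int → List Int → List Int → List Int → List Int → List (Int × Int × Int × Int × Int)
  | [], _, _, _, _ => []
  | x :: rest, s1, s2, s3, s4 =>
    if x ∈ b0 then pvLoop0 b0 b1 b2 b3 b4 rest s1 s2 s3 s4
    else
      let r1 := pvLoop1 b0 b1 b2 b3 b4 x s1 s1 s2 s3 s4
      r1.1 ++ pvLoop0 b0 b1 b2 b3 b4 rest r1.2.1 r1.2.2.1 r1.2.2.2.1 r1.2.2.2.2

def bannable_product_5_py (bans : List (List Int)) (_0s : List Int) (_1s : List Int) (_2s : List Int) (_3s : List Int) (_4s : List Int) : List (Int × Int × Int × Int × Int) :=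
  match bans with
  | b0 :: b1 :: b2 :: b3 :: b4 :: _ => pvLoop0 b0 b1 b2 b3 b4 _0s _1s _2s _3s _4s
  | _ => []  -- bans[4] raises IndexError in Python: excluded by Pre_

-- ===== PORT B =====
-- B's own list comprehension `[x for x in s if x not in ban]`
def pvFiltB (ban : List Int) (s : List Int) : List Int := s.filter (fun x => decide (x ∉ ban))

def bannable_product_5_py_alt (bans : List (List Int)) (_0s : List Int) (_1s : List Int) (_2s : List Int) (_3s : List Int) (_4s : List Int) : List (Int × Int × Int × Int × Int) :=
  if bans.length < 5 then []  -- bans[0]..bans[4] raise IndexError in Python: excluded by Pre_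
  else
    let f0 := pvFiltB (bans.getD 0 []) _0s
    let f1 := pvFiltB (bans.getD 1 []) _1s
    let f2 := pvFiltB (bans.getD 2 []) _2s
    let f3 := pvFiltB (bans.getD 3 []) _3s
    let f4 := pvFiltB (bans.getD 4 []) _4s
    f0.flatMap fun t0 => f1.flatMap fun t1 => f2.flatMap fun t2 => f3.flatMap fun t3 =>
      f4.map fun t4 => (t0, t1, t2, t3, t4)

-- ===== PRECONDITION & SPEC =====
-- A (and B) index bans[0]..bans[4]; both raise IndexError when bans has fewer than 5 elements.
def Pre_bannable_product_5_py (bans : List (List Int)) (_0s : List Int) (_1s : List Int) (_2s : List Int) (_3s : List Int) (_4s : List Int) : Prop := 5 ≤ bans.length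
instance (bans : List (List Int)) (_0s : List Int) (_1s : List Int) (_2s : List Int) (_3s : List Int) (_4s : List Int) : Decidable (Pre_bannable_product_5_py bans _0s _1s _2s _3s _4s) := by unfold Pre_bannable_product_5_py; infer_instance

def pvWitness_bannable_product_5_py : List (List Int) × List Int × List Int × List Int × List Int × List Int :=
  ([[2], [], [9], [], []], [1, 2], [3], [4, 9], [5], [6])

def Spec_bannable_product_5_py (bans : List (List Int)) (_0s : List Int) (_1s : List Int) (_2s : List Int) (_3s : List Int) (_4s : List Int) (out : List (Int × Int × Int × Int × Int)) : Prop := out = bannable_product_5_py_alt bans _0s _1s _2s _3s _4s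
instance (bans : List (List Int)) (_0s : List Int) (_1s : List Int) (_2s : List Int) (_3s : List Int) (_4s : List Int) (out : List (Int × Int × Int × Int × Int)) : Decidable (Spec_bannable_product_5_py bans _0s _1s _2s _3s _4s out) := by unfold Spec_bannable_product_5_py; infer_instance

-- ===== CLAIM (what is proved, stated in full; the proofs are below) =====
def Claim_equal_bannable_product_5_py : Prop := ∀ (bans : List (List Int)) (_0s : List Int) (_1s : List Int) (_2s : List Int) (_3s : List Int) (_4s : List Int), Dom_bannable_product_5_py bans _0s _1s _2s _3s _4s → Pre_bannable_product_5_py bans _0s _1s _2s _3s _4s → Spec_bannable_product_5_py bans _0s _1s _2s _3s _4s (bannable_product_5_py bans _0s _1s _2s _3s _4s)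

-- ===== LEMMAS AND PROOFS =====

theorem pvFilt_idem (b s : List Int) : pvFilt b (pvFilt b s) = pvFilt b s := by
  simp [pvFilt, List.filter_filter]

theorem pvFilt_nil (b : List Int) : pvFilt b [] = [] := rfl

theorem pvFilt_cons (b : List Int) (x : Int) (s : List Int) :
    pvFilt b (x :: s) = if x ∈ b then pvFilt b s else x :: pvFilt b s := by
  by_cases h : x ∈ b <;> simp [pvFilt, h]

-- Each inner loop yields exactly the filtered snapshot, and leaves every threaded state
-- filter-equal to what it started with (only the filtered image of a state is ever used).
theorem pvLoop4_spec (b0 b1 b2 b3 b4 : List Int) (h0 h1 h2 h3 : Int)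
    (n0 : h0 ∉ b0) (n1 : h1 ∉ b1) (n2 : h2 ∉ b2) (n3 : h3 ∉ b3) :
    ∀ (l s : List Int),
      (pvLoop4 b0 b1 b2 b3 b4 h0 h1 h2 h3 l s).1
          = (pvFilt b4 l).map (fun t4 => (h0, h1, h2, h3, t4))
        ∧ pvFilt b4 (pvLoop4 b0 b1 b2 b3 b4 h0 h1 h2 h3 l s).2 = pvFilt b4 s := by
  intro l
  induction l with
  | nil => intro s; simp [pvLoop4, pvFilt_nil]
  | cons x rest ih =>
    intro s
    by_cases hx : x ∈ b4
    · simpa [pvLoop4, hx, pvFilt_idem, pvFilt_cons] using ih (pvFilt b4 s)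
    · have hb : ¬ (h0 ∈ b0 ∨ h1 ∈ b1 ∨ h2 ∈ b2 ∨ h3 ∈ b3) := by
        simp [n0, n1, n2, n3]
      simpa [pvLoop4, hx, hb, pvFilt_cons] using ih s

theorem pvLoop3_spec (b0 b1 b2 b3 b4 : List Int) (h0 h1 h2 : Int)
    (n0 : h0 ∉ b0) (n1 : h1 ∉ b1) (n2 : h2 ∉ b2) :
    ∀ (l s3 s4 : List Int),
      (pvLoop3 b0 b1 b2 b3 b4 h0 h1 h2 l s3 s4).1
          = (pvFilt b3 l).flatMap (fun t3 =>
              (pvFilt b4 s4).map (fun t4 => (h0, h1, h2, t3, t4)))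
        ∧ pvFilt b3 (pvLoop3 b0 b1 b2 b3 b4 h0 h1 h2 l s3 s4).2.1 = pvFilt b3 s3
        ∧ pvFilt b4 (pvLoop3 b0 b1 b2 b3 b4 h0 h1 h2 l s3 s4).2.2 = pvFilt b4 s4 := by
  intro l
  induction l with
  | nil => intro s3 s4; simp [pvLoop3, pvFilt_nil]
  | cons x rest ih =>
    intro s3 s4
    by_cases hx : x ∈ b3
    · simpa [pvLoop3, hx, pvFilt_idem, pvFilt_cons] using ih (pvFilt b3 s3) s4
    · have hb : ¬ (h0 ∈ b0 ∨ h1 ∈ b1 ∨ h2 ∈ b2) := by simp [n0, n1, n2]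
      obtain ⟨o4, s4eq⟩ := pvLoop4_spec b0 b1 b2 b3 b4 h0 h1 h2 x n0 n1 n2 hx s4 s4
      obtain ⟨orr, hs3, hs4⟩ := ih s3 (pvLoop4 b0 b1 b2 b3 b4 h0 h1 h2 x s4 s4).2
      rw [s4eq] at orr
      refine ⟨?_, ?_, ?_⟩
      · simp [pvLoop3, hx, hb, o4, orr, pvFilt_cons]
      · simpa [pvLoop3, hx, hb] using hs3
      · simp [pvLoop3, hx, hb]; rw [hs4, s4eq]

theorem pvLoop2_spec (b0 b1 b2 b3 b4 : List Int) (h0 h1 : Int)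
    (n0 : h0 ∉ b0) (n1 : h1 ∉ b1) :
    ∀ (l s2 s3 s4 : List Int),
      (pvLoop2 b0 b1 b2 b3 b4 h0 h1 l s2 s3 s4).1
          = (pvFilt b2 l).flatMap (fun t2 =>
              (pvFilt b3 s3).flatMap (fun t3 =>
                (pvFilt b4 s4).map (fun t4 => (h0, h1, t2, t3, t4))))
        ∧ pvFilt b2 (pvLoop2 b0 b1 b2 b3 b4 h0 h1 l s2 s3 s4).2.1 = pvFilt b2 s2
        ∧ pvFilt b3 (pvLoop2 b0 b1 b2 b3 b4 h0 h1 l s2 s3 s4).2.2.1 = pvFilt b3 s3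
        ∧ pvFilt b4 (pvLoop2 b0 b1 b2 b3 b4 h0 h1 l s2 s3 s4).2.2.2 = pvFilt b4 s4 := by
  intro l
  induction l with
  | nil => intro s2 s3 s4; simp [pvLoop2, pvFilt_nil]
  | cons x rest ih =>
    intro s2 s3 s4
    by_cases hx : x ∈ b2
    · simpa [pvLoop2, hx, pvFilt_idem, pvFilt_cons] using ih (pvFilt b2 s2) s3 s4
    · have hb : ¬ (h0 ∈ b0 ∨ h1 ∈ b1) := by simp [n0, n1]
      obtain ⟨o3, hs3, hs4⟩ := pvLoop3_spec b0 b1 b2 b3 b4 h0 h1 x n0 n1 hx s3 s3 s4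
      obtain ⟨orr, ts2, ts3, ts4⟩ := ih s2
        (pvLoop3 b0 b1 b2 b3 b4 h0 h1 x s3 s3 s4).2.1 (pvLoop3 b0 b1 b2 b3 b4 h0 h1 x s3 s3 s4).2.2
      rw [hs3, hs4] at orr
      rw [hs3] at ts3
      rw [hs4] at ts4
      refine ⟨?_, ?_, ?_, ?_⟩
      · simp [pvLoop2, hx, hb, o3, orr, pvFilt_cons]
      · simpa [pvLoop2, hx, hb] using ts2
      · simpa [pvLoop2, hx, hb] using ts3
      · simpa [pvLoop2, hx, hb] using ts4

theorem pvLoop1_spec (b0 b1 b2 b3 b4 : List Int) (h0 : Int) (n0 : h0 ∉ b0) :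
    ∀ (l s1 s2 s3 s4 : List Int),
      (pvLoop1 b0 b1 b2 b3 b4 h0 l s1 s2 s3 s4).1
          = (pvFilt b1 l).flatMap (fun t1 =>
              (pvFilt b2 s2).flatMap (fun t2 =>
                (pvFilt b3 s3).flatMap (fun t3 =>
                  (pvFilt b4 s4).map (fun t4 => (h0, t1, t2, t3, t4)))))
        ∧ pvFilt b1 (pvLoop1 b0 b1 b2 b3 b4 h0 l s1 s2 s3 s4).2.1 = pvFilt b1 s1
        ∧ pvFilt b2 (pvLoop1 b0 b1 b2 b3 b4 h0 l s1 s2 s3 s4).2.2.1 = pvFilt b2 s2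
        ∧ pvFilt b3 (pvLoop1 b0 b1 b2 b3 b4 h0 l s1 s2 s3 s4).2.2.2.1 = pvFilt b3 s3
        ∧ pvFilt b4 (pvLoop1 b0 b1 b2 b3 b4 h0 l s1 s2 s3 s4).2.2.2.2 = pvFilt b4 s4 := by
  intro l
  induction l with
  | nil => intro s1 s2 s3 s4; simp [pvLoop1, pvFilt_nil]
  | cons x rest ih =>
    intro s1 s2 s3 s4
    by_cases hx : x ∈ b1
    · simpa [pvLoop1, hx, pvFilt_idem, pvFilt_cons] using ih (pvFilt b1 s1) s2 s3 s4
    · have hb : ¬ (h0 ∈ b0) := n0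
      obtain ⟨o2, hs2, hs3, hs4⟩ := pvLoop2_spec b0 b1 b2 b3 b4 h0 x n0 hx s2 s2 s3 s4
      obtain ⟨orr, ts1, ts2, ts3, ts4⟩ := ih s1
        (pvLoop2 b0 b1 b2 b3 b4 h0 x s2 s2 s3 s4).2.1
        (pvLoop2 b0 b1 b2 b3 b4 h0 x s2 s2 s3 s4).2.2.1
        (pvLoop2 b0 b1 b2 b3 b4 h0 x s2 s2 s3 s4).2.2.2
      rw [hs2, hs3, hs4] at orr
      rw [hs2] at ts2
      rw [hs3] at ts3
      rw [hs4] at ts4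
      refine ⟨?_, ?_, ?_, ?_, ?_⟩
      · simp [pvLoop1, hx, hb, o2, orr, pvFilt_cons]
      · simpa [pvLoop1, hx, hb] using ts1
      · simpa [pvLoop1, hx, hb] using ts2
      · simpa [pvLoop1, hx, hb] using ts3
      · simpa [pvLoop1, hx, hb] using ts4

theorem pvLoop0_spec (b0 b1 b2 b3 b4 : List Int) :
    ∀ (l s1 s2 s3 s4 : List Int),
      pvLoop0 b0 b1 b2 b3 b4 l s1 s2 s3 s4
        = (pvFilt b0 l).flatMap (fun t0 =>
            (pvFilt b1 s1).flatMap (fun t1 =>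
              (pvFilt b2 s2).flatMap (fun t2 =>
                (pvFilt b3 s3).flatMap (fun t3 =>
                  (pvFilt b4 s4).map (fun t4 => (t0, t1, t2, t3, t4)))))) := by
  intro l
  induction l with
  | nil => intro s1 s2 s3 s4; simp [pvLoop0, pvFilt_nil]
  | cons x rest ih =>
    intro s1 s2 s3 s4
    by_cases hx : x ∈ b0
    · simpa [pvLoop0, hx, pvFilt_cons] using ih s1 s2 s3 s4
    · obtain ⟨o1, ts1, ts2, ts3, ts4⟩ := pvLoop1_spec b0 b1 b2 b3 b4 x hx s1 s1 s2 s3 s4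
      have hr := ih (pvLoop1 b0 b1 b2 b3 b4 x s1 s1 s2 s3 s4).2.1
        (pvLoop1 b0 b1 b2 b3 b4 x s1 s1 s2 s3 s4).2.2.1
        (pvLoop1 b0 b1 b2 b3 b4 x s1 s1 s2 s3 s4).2.2.2.1
        (pvLoop1 b0 b1 b2 b3 b4 x s1 s1 s2 s3 s4).2.2.2.2
      rw [ts1, ts2, ts3, ts4] at hr
      simp [pvLoop0, hx, o1, hr, pvFilt_cons]

-- ===== VERDICT (by name: the statement is the Claim_ definition above) =====
theorem bannable_product_5_py_spec : Claim_equal_bannable_product_5_py := by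
  intro bans _0s _1s _2s _3s _4s _hDom hPre
  unfold Spec_bannable_product_5_py
  match bans with
  | b0 :: b1 :: b2 :: b3 :: b4 :: t =>
    have halt : bannable_product_5_py_alt (b0 :: b1 :: b2 :: b3 :: b4 :: t) _0s _1s _2s _3s _4s
        = (pvFilt b0 _0s).flatMap (fun t0 =>
            (pvFilt b1 _1s).flatMap (fun t1 =>
              (pvFilt b2 _2s).flatMap (fun t2 =>
                (pvFilt b3 _3s).flatMap (fun t3 =>
                  (pvFilt b4 _4s).map (fun t4 => (t0, t1, t2, t3, t4)))))) := by
      simp [bannable_product_5_py_alt, pvFiltB, pvFilt]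
    rw [halt]
    exact pvLoop0_spec b0 b1 b2 b3 b4 _0s _1s _2s _3s _4s
  | [] | [_] | [_, _] | [_, _, _] | [_, _, _, _] =>
    exact absurd hPre (by simp [Pre_bannable_product_5_py])
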